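-- pv_equiv track=rewrite | github.com/Alexa-mpv/Hackaton_CyberSeguridad | InspecPrompt.py | encontrarDatosSensibles
-- ===== SOURCE A (Python) =====
-- import string
--
-- def encontrarDatosSensibles(word: str) -> bool:
--     """Función que busca determinar si la secuencia de caracteres otorgada es una secuencia
--     sensible/peligrosa y regresa un booleano."""
--     danger = 0
--     flag = False
--     if word.isdigit() == True:
--         if len(word) > 9 or len(word) <= 12:
--             danger += 5
--     else:
--         if len(word) >= 10:
--             danger += 1
--         for c in word:
--             if c in string.punctuation:
--                 danger += 2
--             if c.isupper():
--                 danger += 2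
--             if c == "@":
--                 flag = True
--             if c == "." and flag == True:
--                 danger += 5
--             if c.isdigit():
--                 danger += 2
--     return danger >= 5
-- ===== SOURCE B (Python) =====
-- import string
--
-- def encontrarDatosSensibles(word: str) -> bool:
--     """Same predicate, computed by separate aggregations instead of one fused
--     flag-latching loop."""
--     if word.isdigit():
--         return True
--     punct = sum(c in string.punctuation for c in word)
--     upper = sum(c.isupper() for c in word)
--     digit = sum(c.isdigit() for c in word)
--     if '@' in word:
--         dots = word[word.index('@') + 1:].count('.')
--     else:
--         dots = 0
--     return (len(word) >= 10) + 2 * (punct + upper + digit) + 5 * dots >= 5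
-- ===== Notes on version B (the rewrite author's own statement) =====
-- stated objective: simpler
-- what changed: Replaced the single fused loop with mutating score/flag state by independent aggregations: three character counts each doubled, plus five per dot strictly after the first at-sign (computed with index, slice and count), plus the length bump; the all-digit branch is returned directly as True since its length condition is always satisfied.
import Mathlib
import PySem

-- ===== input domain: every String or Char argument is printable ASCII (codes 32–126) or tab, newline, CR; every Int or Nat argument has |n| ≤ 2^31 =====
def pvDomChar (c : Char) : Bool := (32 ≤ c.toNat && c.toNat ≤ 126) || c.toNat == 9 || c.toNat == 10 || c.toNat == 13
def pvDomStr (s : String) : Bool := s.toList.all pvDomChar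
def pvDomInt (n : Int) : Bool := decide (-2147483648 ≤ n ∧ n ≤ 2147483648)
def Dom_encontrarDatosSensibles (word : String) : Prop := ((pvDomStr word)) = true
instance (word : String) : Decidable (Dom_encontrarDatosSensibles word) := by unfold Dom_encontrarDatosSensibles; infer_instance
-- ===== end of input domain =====

-- B replaces A's single fused flag-latching loop by independent aggregations
-- (character counts plus an index/slice/count for dots after the first '@'); objective: simpler.


-- string.punctuation (shared constant)
def punctChars : List Char := "!\"#$%&'()*+,-./:;<=>?@[\\]^_`{|}~".toList

-- ===== PORT A =====
-- one step of A's for-loop over the characters; state = (danger, flag)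
def aStep (st : Int × Bool) (c : Char) : Int × Bool :=
  let d1 := if punctChars.contains c then st.1 + 2 else st.1
  let d2 := if PySem.Chars.isupper c then d1 + 2 else d1
  let f1 := if c == '@' then true else st.2
  let d3 := if c == '.' && f1 then d2 + 5 else d2
  let d4 := if PySem.Chars.isdigit c then d3 + 2 else d3
  (d4, f1)

def encontrarDatosSensibles (word : String) : Bool :=
  if PySem.Str.strIsdigit word then
    let danger : Int :=
      if PySem.Str.len word > 9 ∨ PySem.Str.len word ≤ 12 then 0 + 5 else 0
    decide (danger ≥ 5)
  else
    let d0 : Int := if PySem.Str.len word ≥ 10 then 0 + 1 else 0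
    let st := word.toList.foldl aStep (d0, false)
    decide (st.1 ≥ 5)

-- ===== PORT B =====
-- single-character `in` / `.index` / slice / `.count` on a str are ported as the
-- exact list-level operations on word.toList (exact for one-character needles)
def encontrarDatosSensibles_alt (word : String) : Bool :=
  if PySem.Str.strIsdigit word then true
  else
    let cs := word.toList
    let punct : Int := cs.countP (fun c => punctChars.contains c)
    let upper : Int := cs.countP PySem.Chars.isupper
    let digit : Int := cs.countP PySem.Chars.isdigit
    let dots : Int :=
      if '@' ∈ cs then ((cs.drop (cs.idxOf '@' + 1)).count '.' : Int) else 0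
    decide ((if PySem.Str.len word ≥ 10 then (1 : Int) else 0)
      + 2 * (punct + upper + digit) + 5 * dots ≥ 5)

-- ===== PRECONDITION & SPEC =====
def Spec_encontrarDatosSensibles (word : String) (out : Bool) : Prop := out = encontrarDatosSensibles_alt word
instance (word : String) (out : Bool) : Decidable (Spec_encontrarDatosSensibles word out) := by unfold Spec_encontrarDatosSensibles; infer_instance

-- ===== CLAIM (what is proved, stated in full; the proofs are below) =====
def Claim_equal_encontrarDatosSensibles : Prop := ∀ (word : String), Dom_encontrarDatosSensibles word → Spec_encontrarDatosSensibles word (encontrarDatosSensibles word)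

-- ===== LEMMAS AND PROOFS =====

-- score contributed by the '.'-after-'@' rule, starting with flag f
def dotScore (f : Bool) : List Char → Int
  | [] => 0
  | c :: cs =>
      let f1 := if c == '@' then true else f
      (if c == '.' && f1 then (5 : Int) else 0) + dotScore f1 cs

lemma dotScore_true (cs : List Char) : dotScore true cs = 5 * (cs.count '.' : Int) := by
  induction cs with
  | nil => simp [dotScore]
  | cons c cs ih =>
      simp only [dotScore, List.count_cons]
      by_cases h : c = '.' <;> simp [h, ih] <;> omega

lemma dotScore_false (cs : List Char) :
    dotScore false cs =
      if '@' ∈ cs then 5 * (((cs.drop (cs.idxOf '@' + 1)).count '.' : Nat) : Int) else 0 := by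
  induction cs with
  | nil => simp [dotScore]
  | cons c cs ih =>
      by_cases h : c = '@'
      · subst h
        simp [dotScore, dotScore_true]
      · have hb : (c == '@') = false := by simpa using h
        have hmem : ('@' ∈ c :: cs) = ('@' ∈ cs) := by
          rw [List.mem_cons]; exact propext (or_iff_right (fun hx => h hx.symm))
        simp only [dotScore, hb, Bool.and_false, if_false, Bool.false_eq_true,
          zero_add, ih, hmem, List.idxOf_cons_ne _ (by simpa using h)]
        by_cases hm : '@' ∈ cs <;> simp [hm, List.drop_succ_cons]

lemma foldA_fst (cs : List Char) (d : Int) (f : Bool) :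
    (cs.foldl aStep (d, f)).1 =
      d + 2 * (cs.countP (fun c => punctChars.contains c) : Int)
        + 2 * (cs.countP PySem.Chars.isupper : Int)
        + 2 * (cs.countP PySem.Chars.isdigit : Int)
        + dotScore f cs := by
  induction cs generalizing d f with
  | nil => simp [dotScore]
  | cons c cs ih =>
      rw [List.foldl_cons, ih]
      simp only [aStep, dotScore, List.countP_cons]
      split_ifs <;> push_cast <;> omega

-- ===== VERDICT (by name: the statement is the Claim_ definition above) =====
theorem encontrarDatosSensibles_spec : Claim_equal_encontrarDatosSensibles := by
  intro word _
  unfold Spec_encontrarDatosSensibles encontrarDatosSensibles encontrarDatosSensibles_alt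
  simp only [PySem.Str.strIsdigit_eq, PySem.Str.len_eq]
  by_cases hdig : PySem.Chars.strIsdigit word.toList = true
  · simp [hdig]
    split_ifs <;> omega
  · simp only [hdig, Bool.false_eq_true, reduceIte, decide_eq_decide]
    rw [foldA_fst, dotScore_false]
    by_cases hm : '@' ∈ word.toList <;>
      by_cases hl : (10 : Int) ≤ (word.toList.length : Int) <;>
        simp [hm, ge_iff_le] <;> omega
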